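-- pv_equiv track=rewrite | github.com/RichardMiruka/alx-interview | player_simulation/tournament_rounds.py | solution
-- ===== SOURCE A (Python) =====
-- def solution(skills):
--     n = len(skills)
--     rounds = [0] * n  # Initialize rounds array with zeros
--
--     def play_round(players):
--         winners = []
--         for i in range(0, len(players), 2):
--             player1, player2 = players[i], players[i + 1]
--             winner = player1 if skills[player1] > skills[player2] else player2
--             winners.append(winner)
--             rounds[winner] += 1
--         return winners
--
--     players = list(range(n))
--
--     while len(players) >= 2:
--         players = play_round(players)
--
--     return rounds
-- ===== SOURCE B (Python) =====
-- def solution(skills):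
--     # Same elimination tournament, but the outer while-loop is a self-recursive
--     # helper and the inner round consumes the survivor list by slicing two at a
--     # time instead of indexing with range(0, len, 2).
--     def rec(players, rounds):
--         if len(players) < 2:
--             return rounds
--         winners = []
--         rest = players
--         while rest:
--             p1, p2 = rest[0], rest[1]
--             w = p1 if skills[p1] > skills[p2] else p2
--             winners.append(w)
--             rounds[w] += 1
--             rest = rest[2:]
--         return rec(winners, rounds)
--
--     return rec(list(range(len(skills))), [0] * len(skills))
-- ===== Notes on version B (the rewrite author's own statement) =====
-- stated objective: alternative
-- what changed: The outer while-loop is replaced by a self-recursive helper rec(players, rounds), and the index-based inner loop over range(0, len, 2) with players[i]/players[i+1] is replaced by a loop that consumes the survivor list two at a time by slicing (rest[0], rest[1], rest = rest[2:]).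
import Mathlib
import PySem

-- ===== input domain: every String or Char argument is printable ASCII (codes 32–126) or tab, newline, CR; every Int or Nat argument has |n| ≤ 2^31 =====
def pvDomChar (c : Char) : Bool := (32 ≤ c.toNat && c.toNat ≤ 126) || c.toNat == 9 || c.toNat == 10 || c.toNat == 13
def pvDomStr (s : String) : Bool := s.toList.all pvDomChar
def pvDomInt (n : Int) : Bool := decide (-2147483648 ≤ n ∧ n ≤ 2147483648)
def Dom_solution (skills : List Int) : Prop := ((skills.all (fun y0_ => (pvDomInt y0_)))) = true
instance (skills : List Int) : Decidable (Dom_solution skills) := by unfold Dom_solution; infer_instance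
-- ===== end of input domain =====

-- B replaces A's outer while-loop by a self-recursive helper and A's index-based
-- pairing (range(0, len, 2), players[i], players[i+1]) by a loop that consumes the
-- survivor list two at a time by slicing; objective: alternative decomposition, same cost.
-- A mutates nothing observable by the caller; equivalence is about the return value.

-- ===== PORT A =====
-- skills[p] and rounds[w] are ported with pyGetD/pySetD: their indices always come
-- from players ⊆ range(n), so Python never raises there; players[i + 1] CAN raise
-- (odd survivor count) and is ported with pyGet? (none = IndexError).
def solutionStep (skills players : List Int) (acc : Option (List Int × List Int)) (i : Int) :
    Option (List Int × List Int) :=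
  match acc with
  | none => none
  | some (winners, rounds) =>
    match PySem.List.pyGet? players i, PySem.List.pyGet? players (i + 1) with
    | some p1, some p2 =>
        let winner := if PySem.List.pyGetD skills p1 0 > PySem.List.pyGetD skills p2 0 then p1 else p2
        some (winners ++ [winner],
          PySem.List.pySetD rounds winner (PySem.List.pyGetD rounds winner 0 + 1))
    | _, _ => none

def solutionPlayRound (skills players rounds : List Int) : Option (List Int × List Int) :=
  (PySem.List.pyRange 0 (players.length : Int) 2).foldl (solutionStep skills players)
    (some ([], rounds))

-- the `while len(players) >= 2` loop; fuel is a totality guard only (the loop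
-- halves the survivor list, so skills.length + 1 iterations always suffice)
def solutionLoop (skills : List Int) : Nat → List Int → List Int → List Int
  | 0, _, rounds => rounds
  | fuel + 1, players, rounds =>
    if 2 ≤ players.length then
      match solutionPlayRound skills players rounds with
      | some (winners, rounds') => solutionLoop skills fuel winners rounds'
      | none => rounds            -- Python raises IndexError here: outside Pre_
    else rounds

def solution (skills : List Int) : List Int :=
  solutionLoop skills (skills.length + 1) (PySem.List.pyRange 0 (skills.length : Int) 1)
    (List.replicate skills.length 0)

-- ===== PORT B =====
-- the `while rest:` loop of Source B: rest[0]/rest[1] then rest = rest[2:]; on a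
-- singleton survivor rest[1] raises IndexError (none), exactly as A does
def solutionAltPair (skills : List Int) :
    List Int → List Int → List Int → Option (List Int × List Int)
  | [], winners, rounds => some (winners, rounds)
  | [_], _, _ => none               -- rest[1] raises IndexError: outside Pre_
  | p1 :: p2 :: rest, winners, rounds =>
      let w := if PySem.List.pyGetD skills p1 0 > PySem.List.pyGetD skills p2 0 then p1 else p2
      solutionAltPair skills rest (winners ++ [w])
        (PySem.List.pySetD rounds w (PySem.List.pyGetD rounds w 0 + 1))

-- B's helper rec(players, rounds); fuel is a totality guard only (each call
-- at least halves the survivor list, so skills.length + 1 levels always suffice)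
def solutionAltRec (skills : List Int) : Nat → List Int → List Int → List Int
  | 0, _, rounds => rounds
  | fuel + 1, players, rounds =>
    if players.length < 2 then rounds
    else
      match solutionAltPair skills players [] rounds with
      | some (winners, rounds') => solutionAltRec skills fuel winners rounds'
      | none => rounds            -- Python raises IndexError here: outside Pre_

def solution_alt (skills : List Int) : List Int :=
  solutionAltRec skills (skills.length + 1) (PySem.List.pyRange 0 (skills.length : Int) 1)
    (List.replicate skills.length 0)

-- ===== PRECONDITION & SPEC =====
-- Pre_ excludes exactly the inputs where A (and B) raise IndexError: some round
-- sees an odd number (≥ 3) of survivors, i.e. the player count is ≥ 2 and not a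
-- power of two.
def Pre_solution (skills : List Int) : Prop :=
  skills.length ≤ 1 ∨ skills.length = 2 ^ Nat.log2 skills.length
instance (skills : List Int) : Decidable (Pre_solution skills) := by
  unfold Pre_solution; infer_instance

def pvWitness_solution : List Int := [3, 1, 5, 2]

def Spec_solution (skills : List Int) (out : List Int) : Prop := out = solution_alt skills
instance (skills : List Int) (out : List Int) : Decidable (Spec_solution skills out) := by
  unfold Spec_solution; infer_instance

-- ===== CLAIM (what is proved, stated in full; the proofs are below) =====
def Claim_equal_solution : Prop :=
  ∀ (skills : List Int), Dom_solution skills → Pre_solution skills →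
    Spec_solution skills (solution skills)

-- ===== LEMMAS AND PROOFS =====

-- induction scheme matching the two-at-a-time shape of B's pairing loop
def pairShape : List Int → Unit
  | [] => ()
  | [_] => ()
  | _ :: _ :: t => pairShape t

lemma pyGet?_zero_cons_cons (a b : Int) (l : List Int) :
    PySem.List.pyGet? (a :: b :: l) 0 = some a := by
  rw [show (0 : Int) = ((0 : ℕ) : Int) from rfl, PySem.List.pyGet?_natCast]; rfl

lemma pyGet?_one_cons_cons (a b : Int) (l : List Int) :
    PySem.List.pyGet? (a :: b :: l) 1 = some b := by
  rw [show (1 : Int) = ((1 : ℕ) : Int) from rfl, PySem.List.pyGet?_natCast]; rfl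

lemma pyGet?_shift_two (a b : Int) (l : List Int) (i : Int) (h : 0 ≤ i) :
    PySem.List.pyGet? (a :: b :: l) (i + 2) = PySem.List.pyGet? l i := by
  lift i to ℕ using h
  rw [show ((i : Int)) + 2 = ((i + 2 : ℕ) : Int) by push_cast; ring]
  rw [PySem.List.pyGet?_natCast, PySem.List.pyGet?_natCast]
  simp

lemma pyRange_two_cons (m : Nat) :
    PySem.List.pyRange 0 ((m : Int) + 2) 2 = 0 :: (PySem.List.pyRange 0 (m : Int) 2).map (· + 2) := by
  rw [PySem.List.pyRange_of_pos _ _ (by norm_num), PySem.List.pyRange_of_pos _ _ (by norm_num)]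
  rw [if_pos (by positivity)]
  have e1 : ((((m : Int) + 2) - 0 + 2 - 1) / 2).toNat = (m + 3) / 2 := by omega
  have e3 : (if (0 : Int) < (m : Int) then (((m : Int) - 0 + 2 - 1) / 2).toNat else 0)
      = if 0 < m then (m + 1) / 2 else 0 := by split_ifs <;> omega
  have hcnt : (m + 3) / 2 = (if 0 < m then (m + 1) / 2 else 0) + 1 := by split <;> omega
  rw [e1, e3, hcnt, List.range_succ_eq_map]
  simp only [List.map_cons, List.map_map, Nat.cast_zero, mul_zero, add_zero]
  refine congrArg _ (List.map_congr_left fun k _ => ?_)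
  simp [Function.comp]; ring

-- winners-list length produced by B's pairing loop (even survivor count)
lemma solutionAltPair_fst_length (skills : List Int) :
    ∀ (rest ws r ws' r' : List Int),
      solutionAltPair skills rest ws r = some (ws', r') →
      ws'.length = ws.length + rest.length / 2 := by
  intro rest
  induction rest using pairShape.induct with
  | case1 => intro ws r ws' r' h; simp [solutionAltPair] at h; simp [h.1]
  | case2 => intro ws r ws' r' h; simp [solutionAltPair] at h
  | case3 p1 p2 t ih =>
      intro ws r ws' r' h
      simp only [solutionAltPair] at h
      have := ih _ _ _ _ h
      simp at this ⊢
      omega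

-- one round of A's index-based fold equals one pass of B's slicing loop
lemma solutionRound_eq (skills : List Int) :
    ∀ (players : List Int), players.length % 2 = 0 →
    ∀ (ws rounds : List Int),
      (PySem.List.pyRange 0 (players.length : Int) 2).foldl (solutionStep skills players)
          (some (ws, rounds))
        = solutionAltPair skills players ws rounds := by
  intro players
  induction players using pairShape.induct with
  | case1 =>
      intro _ ws rounds
      simp [solutionAltPair, PySem.List.pyRange]
  | case2 => intro h; simp at h
  | case3 p1 p2 rest ih =>
      intro heven ws rounds
      have hcast : (((p1 :: p2 :: rest).length : ℕ) : Int) = ((rest.length : ℕ) : Int) + 2 := by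
        push_cast [List.length_cons]; ring
      rw [hcast, pyRange_two_cons, List.foldl_cons]
      have hstep : solutionStep skills (p1 :: p2 :: rest) (some (ws, rounds)) 0
          = some ((ws ++ [if PySem.List.pyGetD skills p1 0 > PySem.List.pyGetD skills p2 0 then p1 else p2]),
              (PySem.List.pySetD rounds
                (if PySem.List.pyGetD skills p1 0 > PySem.List.pyGetD skills p2 0 then p1 else p2)
                (PySem.List.pyGetD rounds
                  (if PySem.List.pyGetD skills p1 0 > PySem.List.pyGetD skills p2 0 then p1 else p2) 0 + 1))) := by
        simp only [solutionStep, pyGet?_zero_cons_cons, zero_add, pyGet?_one_cons_cons]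
      rw [hstep, List.foldl_map]
      rw [PySem.List.foldl_congr_mem _ _
        (fun acc i => solutionStep skills rest acc i) _ (by
          intro acc i hi
          have hnn : 0 ≤ i := ((PySem.List.mem_pyRange_iff_of_pos (by norm_num) i).mp hi).1
          match acc with
          | none => simp [solutionStep]
          | some (w, r) =>
            simp only [solutionStep, pyGet?_shift_two _ _ _ _ hnn,
              show i + 2 + 1 = (i + 1) + 2 by ring,
              pyGet?_shift_two _ _ _ _ (by omega : (0:Int) ≤ i + 1)])]
      rw [ih (by simp at heven; omega)]
      simp [solutionAltPair]

-- both outer loops agree when the survivor count is a power of two within fuel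
lemma loop_eq (skills : List Int) :
    ∀ (k fuel : Nat) (players rounds : List Int),
      players.length = 2 ^ k → k < fuel →
      solutionLoop skills fuel players rounds = solutionAltRec skills fuel players rounds := by
  intro k
  induction k with
  | zero =>
      intro fuel players rounds hlen hfuel
      obtain ⟨f, rfl⟩ : ∃ f, fuel = f + 1 := ⟨fuel - 1, by omega⟩
      simp [solutionLoop, solutionAltRec, hlen]
  | succ k ih =>
      intro fuel players rounds hlen hfuel
      obtain ⟨f, rfl⟩ : ∃ f, fuel = f + 1 := ⟨fuel - 1, by omega⟩
      have h2 : 2 ≤ players.length := by rw [hlen]; exact Nat.one_lt_two_pow (by omega)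
      have heven : players.length % 2 = 0 := by
        rw [hlen, pow_succ]; omega
      have hround := solutionRound_eq skills players heven [] rounds
      simp only [solutionLoop, solutionAltRec, if_pos h2, if_neg (by omega : ¬ players.length < 2),
        solutionPlayRound, hround]
      match hres : solutionAltPair skills players [] rounds with
      | none => rfl
      | some (winners, rounds') =>
        apply ih
        · have hl := solutionAltPair_fst_length skills players [] rounds winners rounds' hres
          simp only [List.length_nil, Nat.zero_add] at hl
          rw [hlen, pow_succ, Nat.mul_div_cancel _ (by norm_num : 0 < 2)] at hl
          exact hl
        · omega

-- ===== VERDICT (by name: the statement is the Claim_ definition above) =====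
theorem solution_spec : Claim_equal_solution := by
  intro skills _ hpre
  unfold Spec_solution solution solution_alt
  rcases Nat.eq_zero_or_pos skills.length with h0 | hpos
  · rw [List.length_eq_zero_iff.mp h0]
    decide
  · have hpow : skills.length = 2 ^ Nat.log2 skills.length := by
      rcases hpre with h1 | h
      · have h1' : skills.length = 1 := by omega
        rw [h1']
        decide
      · exact h
    exact loop_eq skills (Nat.log2 skills.length) (skills.length + 1) _ _
      (by simp [PySem.List.length_pyRange_one]; omega)
      (by have := Nat.log2_le_self skills.length; omega)
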